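-- pv_equiv track=rewrite | github.com/hghyhghy/Codechef-Coding-Ninja | Desktop/DSA/T81/countpairwithzero.py | count_pairs_with_zero_sum
-- ===== SOURCE A (Python) =====
-- def count_pairs_with_zero_sum(array:list[int])->int:
--
--     n=len(array)
--     count  = 0
--
--
--     for i in range(n):
--
--         for j in range(i+1,n):
--
--             if array[i] + array[j] == 0:
--
--                 count  += 1
--
--     return count
-- ===== SOURCE B (Python) =====
-- def count_pairs_with_zero_sum(array: list[int]) -> int:
--     # One pass: for each element, add how many earlier elements are its negation.
--     seen = {}
--     count = 0
--     for x in array: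
--         count += seen.get(-x, 0)
--         seen[x] = seen.get(x, 0) + 1
--     return count
-- ===== Notes on version B (the rewrite author's own statement) =====
-- stated objective: faster
-- what changed: replaced the O(n^2) nested index loops by a single pass that keeps a hash map of value counts and adds the count of each element's negation seen so far
import Mathlib
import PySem

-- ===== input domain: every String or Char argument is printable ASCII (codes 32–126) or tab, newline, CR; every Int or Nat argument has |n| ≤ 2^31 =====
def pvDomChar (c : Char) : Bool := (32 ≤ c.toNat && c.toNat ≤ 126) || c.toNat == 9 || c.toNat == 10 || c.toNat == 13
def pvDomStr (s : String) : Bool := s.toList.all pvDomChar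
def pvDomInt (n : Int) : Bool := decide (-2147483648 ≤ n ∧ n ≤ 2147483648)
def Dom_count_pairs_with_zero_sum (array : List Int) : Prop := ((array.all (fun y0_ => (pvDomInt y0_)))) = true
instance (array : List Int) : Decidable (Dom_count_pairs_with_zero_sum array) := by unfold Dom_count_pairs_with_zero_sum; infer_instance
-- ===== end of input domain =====

-- B replaces A's nested index loops by a single pass keeping a dict of value counts
-- and adding, for each element, the count of its negation seen so far (faster).

-- ===== PORT A =====
def count_pairs_with_zero_sum (array : List Int) : Int :=
  let n : Int := PySem.List.len array
  (PySem.List.pyRange 0 n 1).foldl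
    (fun count i =>
      (PySem.List.pyRange (i + 1) n 1).foldl
        (fun count j =>
          if PySem.List.pyGetD array i 0 + PySem.List.pyGetD array j 0 = 0 then count + 1
          else count)
        count)
    0

-- ===== PORT B =====
def count_pairs_with_zero_sum_alt (array : List Int) : Int :=
  let r :=
    array.foldl
      (fun (st : PySem.Dict Int Int × Int) x =>
        (st.1.modify x 0 (· + 1), st.2 + st.1.getD (-x) 0))
      (PySem.Dict.empty, 0)
  r.2

-- ===== PRECONDITION & SPEC =====
def Spec_count_pairs_with_zero_sum (array : List Int) (out : Int) : Prop := out = count_pairs_with_zero_sum_alt array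
instance (array : List Int) (out : Int) : Decidable (Spec_count_pairs_with_zero_sum array out) := by unfold Spec_count_pairs_with_zero_sum; infer_instance

-- ===== CLAIM (what is proved, stated in full; the proofs are below) =====
def Claim_equal_count_pairs_with_zero_sum : Prop := ∀ (array : List Int), Dom_count_pairs_with_zero_sum array → Spec_count_pairs_with_zero_sum array (count_pairs_with_zero_sum array)

-- ===== LEMMAS AND PROOFS =====

-- reference value: for each head, the zero-sum pairs it forms with the rest of the list
def pairsFrom : List Int → Int
  | [] => 0
  | x :: xs => (xs.countP (fun y => decide (x + y = 0)) : Int) + pairsFrom xs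

-- A's row sums (row k pairs index k with the later indices) add up to pairsFrom
lemma sum_rows (array : List Int) :
    ((List.range array.length).map
      (fun k => ((array.drop (k + 1)).countP (fun y => decide (array.getD k 0 + y = 0)) : Int))).sum
      = pairsFrom array := by
  induction array with
  | nil => simp [pairsFrom]
  | cons x xs ih =>
    simp only [List.length_cons, List.range_succ_eq_map, List.map_cons, List.map_map,
      List.sum_cons, pairsFrom]
    rw [← ih]
    have htail : (List.map
          ((fun k => ((List.countP (fun y => decide ((x :: xs).getD k 0 + y = 0)) (List.drop (k + 1) (x :: xs)) : Nat) : Int)) ∘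
            Nat.succ)
          (List.range xs.length))
        = List.map (fun k => ((List.countP (fun y => decide (xs.getD k 0 + y = 0)) (List.drop (k + 1) xs) : Nat) : Int))
          (List.range xs.length) :=
      List.map_congr_left (fun k _ => by
        simp [Function.comp, Nat.succ_eq_add_one])
    rw [htail]
    simp

lemma A_eq (array : List Int) : count_pairs_with_zero_sum array = pairsFrom array := by
  show (PySem.List.pyRange 0 (PySem.List.len array) 1).foldl
      (fun count i =>
        (PySem.List.pyRange (i + 1) (PySem.List.len array) 1).foldl
          (fun count j =>
            if PySem.List.pyGetD array i 0 + PySem.List.pyGetD array j 0 = 0 then count + 1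
            else count)
          count)
      0 = pairsFrom array
  have step : (PySem.List.pyRange 0 (PySem.List.len array) 1).foldl
      (fun count i =>
        (PySem.List.pyRange (i + 1) (PySem.List.len array) 1).foldl
          (fun count j =>
            if PySem.List.pyGetD array i 0 + PySem.List.pyGetD array j 0 = 0 then count + 1
            else count)
          count)
      0
      = (PySem.List.pyRange 0 (PySem.List.len array) 1).foldl
      (fun count i =>
        count + ((array.drop (i + 1).toNat).countP
          (fun y => decide (PySem.List.pyGetD array i 0 + y = 0)) : Int))
      0 := by
    apply PySem.List.foldl_congr_mem
    intro acc i hi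
    have h0 : (0 : Int) ≤ i + 1 := by
      have := (PySem.List.mem_pyRange_one.mp hi).1; omega
    rw [PySem.List.foldl_ite_add_one]
    congr 1
    rw [← PySem.List.map_pyGetD_pyRange (xs := array) (a := i + 1) (d := 0) h0,
      List.countP_map]
    rfl
  rw [step]
  rw [PySem.List.foldl_add, PySem.List.pyRange_one, List.map_map]
  simp only [PySem.List.len_eq, Int.sub_zero, Int.toNat_natCast, zero_add]
  rw [← sum_rows array]
  apply congrArg List.sum
  apply List.map_congr_left
  intro k _
  have h1 : ((k : Int) + 1).toNat = k + 1 := by omega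
  simp [Function.comp, h1, PySem.List.pyGetD_natCast]

-- loop invariant for B: starting from dict d and count c, the final count is
-- c, plus for each element the number of copies of its negation already in d,
-- plus the zero-sum pairs inside the remaining list itself
lemma B_inv (l : List Int) (d : PySem.Dict Int Int) (c : Int) :
    (l.foldl
      (fun (st : PySem.Dict Int Int × Int) x =>
        (st.1.modify x 0 (· + 1), st.2 + st.1.getD (-x) 0))
      (d, c)).2
    = c + (l.map (fun x => d.getD (-x) 0)).sum + pairsFrom l := by
  induction l generalizing d c with
  | nil => simp [pairsFrom]
  | cons x l ih =>
    simp only [List.foldl_cons, ih, List.map_cons, List.sum_cons, pairsFrom]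
    have hmod : ∀ y : Int, (d.modify x 0 (· + 1)).getD (-y) 0
        = d.getD (-y) 0 + (if decide (x + y = 0) then (1 : Int) else 0) := by
      intro y
      have := PySem.Dict.getD_foldl_modify_add_one (l := [x]) (d := d) (v := -y)
      simp only [List.foldl_cons, List.foldl_nil] at this
      rw [this]
      by_cases h : x + y = 0
      · have hx : -y = x := by omega
        simp [hx, h]
      · have hx : ¬ (-y = x) := by omega
        simp [h, List.count_eq_zero]
        omega
    have hsum : (l.map (fun y => (d.modify x 0 (· + 1)).getD (-y) 0)).sum
        = (l.map (fun y => d.getD (-y) 0)).sum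
          + (l.countP (fun y => decide (x + y = 0)) : Int) := by
      rw [← PySem.List.sum_map_ite_one_zero]
      rw [← PySem.List.sum_map_add_int]
      congr 1
      exact List.map_congr_left (fun y _ => hmod y)
    rw [hsum]
    ring

lemma B_eq (array : List Int) : count_pairs_with_zero_sum_alt array = pairsFrom array := by
  unfold count_pairs_with_zero_sum_alt
  rw [B_inv]
  simp [PySem.Dict.empty, PySem.Dict.getD, PySem.Dict.get?]

-- ===== VERDICT (by name: the statement is the Claim_ definition above) =====
theorem count_pairs_with_zero_sum_spec : Claim_equal_count_pairs_with_zero_sum := by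
  intro array _
  unfold Spec_count_pairs_with_zero_sum
  rw [A_eq, B_eq]
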